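-- pv_equiv track=rewrite | github.com/likole/ctf | 20180324-3.py | nlfsr
-- ===== SOURCE A (Python) =====
-- def nlfsr(R,mask):
--     output = (R << 1) & 0xffffff
--     i=(R&mask)&0xffffff
--     lastbit=0
--     changesign=True
--     while i!=0:
--         if changesign:
--             lastbit &= (i & 1)
--             changesign=False
--         else:
--             lastbit^=(i&1)
--         i=i>>1
--     output^=lastbit
--     return (output,lastbit)
-- ===== SOURCE B (Python) =====
-- def nlfsr(R, mask):
--     lastbit = bin(((R & mask) & 0xffffff) >> 1).count('1') & 1
--     output = ((R << 1) & 0xffffff) ^ lastbit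
--     return (output, lastbit)
-- ===== Notes on version B (the rewrite author's own statement) =====
-- stated objective: simpler
-- what changed: Replaces A's bit-by-bit while loop with its lastbit accumulator and changesign sentinel (which only zeroes out the lowest bit) by a direct decomposition: shift the masked value right once and take the popcount parity (bin(x).count('1') & 1).
import Mathlib
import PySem

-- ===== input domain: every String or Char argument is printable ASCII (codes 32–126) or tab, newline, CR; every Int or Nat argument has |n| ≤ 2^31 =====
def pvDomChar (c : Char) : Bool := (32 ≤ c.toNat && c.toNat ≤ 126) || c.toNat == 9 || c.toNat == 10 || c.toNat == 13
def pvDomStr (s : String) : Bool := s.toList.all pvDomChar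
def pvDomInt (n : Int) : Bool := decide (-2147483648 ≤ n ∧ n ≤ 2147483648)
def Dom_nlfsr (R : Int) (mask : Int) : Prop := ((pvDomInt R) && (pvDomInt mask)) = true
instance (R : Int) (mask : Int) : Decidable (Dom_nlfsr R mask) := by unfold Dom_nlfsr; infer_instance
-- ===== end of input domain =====

-- B replaces A's bit-by-bit accumulator-and-sentinel while loop by a shift-then-popcount-parity
-- decomposition (simpler); return values agree on all inputs.

-- ===== PORT A =====
-- Python's 'while i != 0' loop; the loop variable i = (R&mask)&0xffffff is nonnegative,
-- so it is carried as a Nat (exact: Python's i>>1 / i&1 are Nat's >>> 1 / &&& 1 there).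
def nlfsrLoop (i : Nat) (lastbit : Int) (changesign : Bool) : Int :=
  if _h : i = 0 then lastbit
  else if changesign then
    nlfsrLoop (i >>> 1) (PySem.Int.band lastbit ((i &&& 1 : Nat) : Int)) false
  else
    nlfsrLoop (i >>> 1) (PySem.Int.bxor lastbit ((i &&& 1 : Nat) : Int)) false
decreasing_by all_goals (simp [Nat.shiftRight_one]; omega)

def nlfsr (R : Int) (mask : Int) : Int × Int :=
  let output := PySem.Int.band (R <<< 1) 0xffffff
  let i := PySem.Int.band (PySem.Int.band R mask) 0xffffff
  let lastbit := nlfsrLoop i.toNat 0 true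
  (PySem.Int.bxor output lastbit, lastbit)

-- ===== PORT B =====
-- bin(x).count('1') is ported as PySem.Int.bitCount (the corresponding library popcount).
def nlfsr_alt (R : Int) (mask : Int) : Int × Int :=
  let lastbit : Int :=
    PySem.Int.band ((PySem.Int.bitCount ((PySem.Int.band (PySem.Int.band R mask) 0xffffff) >>> (1:Nat)) : Nat) : Int) 1
  let output := PySem.Int.bxor (PySem.Int.band (R <<< 1) 0xffffff) lastbit
  (output, lastbit)

-- ===== PRECONDITION & SPEC =====
def Spec_nlfsr (R : Int) (mask : Int) (out : Int × Int) : Prop := out = nlfsr_alt R mask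
instance (R : Int) (mask : Int) (out : Int × Int) : Decidable (Spec_nlfsr R mask out) := by unfold Spec_nlfsr; infer_instance

-- ===== CLAIM (what is proved, stated in full; the proofs are below) =====
def Claim_equal_nlfsr : Prop := ∀ (R : Int) (mask : Int), Dom_nlfsr R mask → Spec_nlfsr R mask (nlfsr R mask)

-- ===== LEMMAS AND PROOFS =====

lemma nlfsrLoop_false (i : Nat) : ∀ b : Nat, b ≤ 1 →
    nlfsrLoop i (b : Int) false = (((b + PySem.Int.bitCount (i : Int)) % 2 : Nat) : Int) := by
  induction i using Nat.strong_induction_on with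
  | _ i ih =>
    intro b hb
    by_cases h : i = 0
    · subst h
      simp [nlfsrLoop]
      omega
    · rw [nlfsrLoop]
      simp only [h]
      rw [show ((b : Int) = ((b : Nat) : Int)) from rfl]
      rw [PySem.Int.bxor_natCast]
      have h2 : i >>> 1 = i / 2 := Nat.shiftRight_one i
      have hx : b ^^^ (i &&& 1) ≤ 1 := by
        rw [Nat.and_one_is_mod]
        interval_cases b <;> rcases Nat.mod_two_eq_zero_or_one i with h1 | h1 <;> simp [h1]
      rw [ih (i >>> 1) (by omega) _ hx]
      rw [PySem.Int.bitCount_natCast (show 0 < i by omega)]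
      rw [h2, Nat.and_one_is_mod]
      interval_cases b <;> rcases Nat.mod_two_eq_zero_or_one i with h1 | h1 <;>
        simp [h1] <;> omega

lemma nlfsrLoop_true (i : Nat) :
    nlfsrLoop i 0 true = ((PySem.Int.bitCount ((i >>> 1 : Nat) : Int) % 2 : Nat) : Int) := by
  by_cases h : i = 0
  · subst h; simp [nlfsrLoop]
  · rw [nlfsrLoop]
    simp only [h]
    have hband : PySem.Int.band 0 ((i &&& 1 : Nat) : Int) = ((0 : Nat) : Int) := by
      rw [PySem.Int.band_comm]; simp
    rw [hband, nlfsrLoop_false _ 0 (by omega)]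
    simp

lemma natCast_shiftRight_one (n : Int) (h : 0 ≤ n) :
    ((n.toNat >>> 1 : Nat) : Int) = n >>> (1:Nat) := by
  conv_rhs => rw [← Int.toNat_of_nonneg h]
  rfl

-- ===== VERDICT (by name: the statement is the Claim_ definition above) =====
theorem nlfsr_spec : Claim_equal_nlfsr := by
  intro R mask _
  unfold Spec_nlfsr nlfsr nlfsr_alt
  have hn : 0 ≤ PySem.Int.band (PySem.Int.band R mask) 0xffffff := by
    rw [PySem.Int.band_comm]
    exact PySem.Int.band_nonneg_of_nonneg_left _ (by norm_num)
  set n := PySem.Int.band (PySem.Int.band R mask) 0xffffff with hn_def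
  have hlast : nlfsrLoop n.toNat 0 true =
      PySem.Int.band ((PySem.Int.bitCount (n >>> (1 : Nat)) : Nat) : Int) 1 := by
    rw [nlfsrLoop_true, natCast_shiftRight_one n hn]
    rw [show ((1 : Int) = ((1 : Nat) : Int)) from rfl, PySem.Int.band_natCast]
    rw [Nat.and_one_is_mod]
  simp only [hlast]
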